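-- pv_equiv track=rewrite | github.com/walborn/yandex.algorithms | 7/3. Битовые операции, исправляющие коды Хэмминга, сжатие данных/I. Исправление одной ошибки/index.py | cnt_odd
-- ===== SOURCE A (Python) =====
-- def cnt_odd(s):
--   ans = [0] * 17
--   for i in range(1, len(s)):
--     if s[i] == 1:
--       for bit in range(17):
--         if i & 1 == 1:
--           ans[bit] += 1
--         i >>= 1
--
--   return ans
-- ===== SOURCE B (Python) =====
-- def cnt_odd(s):
--     # Tree reduction: level 0 holds indicator weights per index; summing the
--     # odd positions of level b counts indices with bit b set, and pairwise
--     # halving moves to the next bit.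
--     w = [1 if x == 1 else 0 for x in s]
--     ans = []
--     for _ in range(17):
--         total = 0
--         pairs = []
--         carry = None
--         for x in w:
--             if carry is None:
--                 carry = x
--             else:
--                 total += x
--                 pairs.append(carry + x)
--                 carry = None
--         if carry is not None:
--             pairs.append(carry)
--         ans.append(total)
--         w = pairs
--     return ans
-- ===== Notes on version B (the rewrite author's own statement) =====
-- stated objective: alternative
-- what changed: Replaces A's per-index binary decomposition (peeling 17 bits off each set index) by a 17-level tree reduction: keep a weight array of indicators, read off the bit-b count as the sum of odd positions of level b, and halve the array pairwise to advance to the next bit.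
import Mathlib
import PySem

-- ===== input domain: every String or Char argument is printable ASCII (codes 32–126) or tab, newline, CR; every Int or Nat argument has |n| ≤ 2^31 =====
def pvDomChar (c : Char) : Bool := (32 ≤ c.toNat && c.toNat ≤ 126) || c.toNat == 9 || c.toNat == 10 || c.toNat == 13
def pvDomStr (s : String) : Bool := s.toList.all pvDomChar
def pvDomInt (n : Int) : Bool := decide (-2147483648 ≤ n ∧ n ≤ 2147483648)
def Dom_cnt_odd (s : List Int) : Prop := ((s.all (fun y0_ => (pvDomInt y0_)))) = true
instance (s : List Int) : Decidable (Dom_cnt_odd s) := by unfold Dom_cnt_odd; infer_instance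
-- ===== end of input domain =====

-- B replaces A's per-index bit peeling by a 17-level pairwise tree reduction (alternative algorithm, same cost).

-- ===== PORT A =====
-- literal transliteration of A; 'i & 1' is PySem.Int.band, 'i >>= 1' is Lean's '>>> 1'
-- (exact: Python's >> is Lean's >>> on Int); s[i] and ans[bit] are in range on every
-- iteration (1 ≤ i < len s, 0 ≤ bit < 17 = len ans), so the total pyGetD/pySetD are exact.
def cnt_odd (s : List Int) : List Int :=
  (PySem.List.pyRange 1 (PySem.List.len s) 1).foldl (fun ans i =>
    if PySem.List.pyGetD s i 0 == 1 then
      ((PySem.List.pyRange 0 17 1).foldl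
        (fun (st : List Int × Int) bit =>
          (if PySem.Int.band st.2 1 == 1 then
             PySem.List.pySetD st.1 bit (PySem.List.pyGetD st.1 bit 0 + 1)
           else st.1,
           st.2 >>> 1))
        (ans, i)).1
    else ans)
    (List.replicate 17 0)

-- ===== PORT B =====
-- one pass of Source B's inner 'for x in w' loop (state: total, pairs, carry), then the
-- trailing 'if carry is not None' flush; returns (total, pairs) = (ans entry, next level)
def pvLevel (w : List Int) : Int × List Int :=
  let st := w.foldl
    (fun (st : Int × List Int × Option Int) x =>
      match st.2.2 with
      | none => (st.1, st.2.1, some x)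
      | some c => (st.1 + x, st.2.1 ++ [c + x], none))
    (0, [], none)
  match st.2.2 with
  | none => (st.1, st.2.1)
  | some c => (st.1, st.2.1 ++ [c])

-- Source B's 'for _ in range(17)' loop collecting one total per level
def pvLevels : Nat → List Int → List Int
  | 0, _ => []
  | k+1, w => (pvLevel w).1 :: pvLevels k (pvLevel w).2

def cnt_odd_alt (s : List Int) : List Int :=
  pvLevels 17 (s.map (fun x => if x == 1 then (1 : Int) else 0))

-- ===== PRECONDITION & SPEC =====
def Spec_cnt_odd (s : List Int) (out : List Int) : Prop := out = cnt_odd_alt s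
instance (s : List Int) (out : List Int) : Decidable (Spec_cnt_odd s out) := by unfold Spec_cnt_odd; infer_instance

-- ===== CLAIM (what is proved, stated in full; the proofs are below) =====
def Claim_equal_cnt_odd : Prop := ∀ (s : List Int), Dom_cnt_odd s → Spec_cnt_odd s (cnt_odd s)

-- ===== LEMMAS AND PROOFS =====

-- weighted bit-b count: Σ_j w[j] * [bit b of j is set]
def Cw (w : List Int) (b : Nat) : Int :=
  ∑ j ∈ Finset.range w.length, w.getD j 0 * (if Nat.testBit j b then 1 else 0)

-- reference shapes of one reduction pass
def oddSum : List Int → Int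
  | [] => 0
  | [_] => 0
  | _ :: b :: t => b + oddSum t

def halve : List Int → List Int
  | [] => []
  | [a] => [a]
  | a :: b :: t => (a + b) :: halve t

def ind (s : List Int) : List Int := s.map (fun x => if x == 1 then (1 : Int) else 0)

-- proof-side names for the two lambdas inside cnt_odd (definitionally equal to them)
def innerStep (st : List Int × Int) (bit : Int) : List Int × Int :=
  (if PySem.Int.band st.2 1 == 1 then
     PySem.List.pySetD st.1 bit (PySem.List.pyGetD st.1 bit 0 + 1)
   else st.1,
   st.2 >>> 1)

def outerStep (s : List Int) (ans : List Int) (i : Int) : List Int :=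
  if PySem.List.pyGetD s i 0 == 1 then
    ((PySem.List.pyRange 0 17 1).foldl innerStep (ans, i)).1
  else ans

theorem pvLevel_fold (w : List Int) : ∀ (tot : Int) (ps : List Int),
    (let st := w.foldl
      (fun (st : Int × List Int × Option Int) x =>
        match st.2.2 with
        | none => (st.1, st.2.1, some x)
        | some c => (st.1 + x, st.2.1 ++ [c + x], none))
      (tot, ps, none);
     match st.2.2 with
     | none => (st.1, st.2.1)
     | some c => (st.1, st.2.1 ++ [c])) = (tot + oddSum w, ps ++ halve w) := by
  induction w using halve.induct with
  | case1 => intro tot ps; simp [oddSum, halve]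
  | case2 a => intro tot ps; simp [oddSum, halve]
  | case3 a b t ih =>
      intro tot ps
      have := ih (tot + b) (ps ++ [a + b])
      simp only [List.foldl_cons] at this ⊢
      simpa [oddSum, halve, add_assoc] using this

theorem pvLevel_eq (w : List Int) : pvLevel w = (oddSum w, halve w) := by
  have := pvLevel_fold w 0 []
  simpa [pvLevel] using this

theorem halve_length (w : List Int) : (halve w).length = (w.length + 1) / 2 := by
  induction w using halve.induct with
  | case1 => simp [halve]
  | case2 a => simp [halve]
  | case3 a b t ih => simp [halve, ih]; omega

theorem halve_getD (w : List Int) : ∀ (j : Nat),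
    (halve w).getD j 0 = w.getD (2*j) 0 + w.getD (2*j+1) 0 := by
  induction w using halve.induct with
  | case1 => intro j; simp [halve]
  | case2 a => intro j; cases j <;> simp [halve]
  | case3 a b t ih =>
      intro j
      cases j with
      | zero => simp [halve]
      | succ j =>
          have h1 : 2*(j+1) = (2*j) + 1 + 1 := by ring
          have h2 : 2*(j+1)+1 = (2*j+1) + 1 + 1 := by ring
          rw [h2, h1]
          simp only [halve, List.getD_cons_succ]
          exact ih j

theorem pair_sum (f : Nat → Int) (m : Nat) :
    ∑ i ∈ Finset.range (2*m), f i = ∑ j ∈ Finset.range m, (f (2*j) + f (2*j+1)) := by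
  induction m with
  | zero => simp
  | succ m ih =>
      have h : 2*(m+1) = 2*m + 1 + 1 := by ring
      rw [h, Finset.sum_range_succ, Finset.sum_range_succ, ih, Finset.sum_range_succ]
      ring

theorem Cw_pairs (w : List Int) (b : Nat) :
    Cw w b = ∑ j ∈ Finset.range ((w.length + 1) / 2),
      (w.getD (2*j) 0 * (if Nat.testBit (2*j) b then 1 else 0)
        + w.getD (2*j+1) 0 * (if Nat.testBit (2*j+1) b then 1 else 0)) := by
  have hext : Cw w b = ∑ i ∈ Finset.range (2 * ((w.length + 1) / 2)),
      w.getD i 0 * (if Nat.testBit i b then 1 else 0) := by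
    unfold Cw
    have hsub : Finset.range w.length ⊆ Finset.range (2 * ((w.length + 1) / 2)) := by
      intro x hx
      simp only [Finset.mem_range] at hx ⊢
      omega
    apply Finset.sum_subset hsub
    intro i _ hi
    simp only [Finset.mem_range, not_lt] at hi
    rw [List.getD_eq_default _ _ hi, zero_mul]
  rw [hext, pair_sum (fun i => w.getD i 0 * (if Nat.testBit i b then 1 else 0)) ((w.length + 1) / 2)]

theorem oddSum_sum (w : List Int) :
    oddSum w = ∑ j ∈ Finset.range ((w.length + 1) / 2), w.getD (2*j+1) 0 := by
  induction w using halve.induct with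
  | case1 => simp [oddSum]
  | case2 a => simp [oddSum]
  | case3 a b t ih =>
      have hl : ((t.length + 1 + 1) + 1) / 2 = (t.length + 1) / 2 + 1 := by omega
      simp only [oddSum, List.length_cons, hl, Finset.sum_range_succ']
      have e : ∀ j : Nat, 2*(j+1)+1 = 2*j+1+1+1 := fun j => by ring
      simp only [e, List.getD_cons_succ]
      rw [ih]
      norm_num [List.getD_cons_succ, List.getD_cons_zero]
      exact add_comm _ _

theorem oddSum_eq (w : List Int) : oddSum w = Cw w 0 := by
  rw [Cw_pairs, oddSum_sum]
  apply Finset.sum_congr rfl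
  intro j _
  have h0 : Nat.testBit (2*j) 0 = false := by
    rw [Nat.testBit_zero]; exact decide_eq_false (by omega)
  have h1 : Nat.testBit (2*j+1) 0 = true := by
    rw [Nat.testBit_zero]; exact decide_eq_true (by omega)
  simp [h0, h1]

theorem Cw_halve (w : List Int) (b : Nat) : Cw (halve w) b = Cw w (b+1) := by
  rw [Cw_pairs w (b+1)]
  unfold Cw
  rw [halve_length]
  apply Finset.sum_congr rfl
  intro j _
  rw [halve_getD]
  have e0 : Nat.testBit (2*j) (b+1) = Nat.testBit j b := by
    rw [Nat.testBit_succ]; congr 1; omega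
  have e1 : Nat.testBit (2*j+1) (b+1) = Nat.testBit j b := by
    rw [Nat.testBit_succ]; congr 1; omega
  rw [e0, e1, add_mul]

theorem pvLevels_eq (k : Nat) : ∀ (w : List Int),
    pvLevels k w = (List.range k).map (fun b => Cw w b) := by
  induction k with
  | zero => intro w; simp [pvLevels]
  | succ k ih =>
      intro w
      rw [List.range_succ_eq_map]
      simp only [pvLevels, pvLevel_eq, List.map_cons, List.map_map]
      rw [ih (halve w), ← oddSum_eq]
      congr 1
      apply List.map_congr_left
      intro b _
      simp [Function.comp, Cw_halve, Nat.succ_eq_add_one]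

theorem Cw_append (w : List Int) (x : Int) (b : Nat) :
    Cw (w ++ [x]) b = Cw w b + x * (if Nat.testBit w.length b then 1 else 0) := by
  unfold Cw
  rw [List.length_append, List.length_singleton, Finset.sum_range_succ]
  congr 1
  · apply Finset.sum_congr rfl
    intro j hj
    simp at hj
    rw [List.getD_append _ _ _ _ hj]
  · congr 1
    rw [List.getD_eq_getElem _ _ (by simp), List.getElem_append_right (by omega)]
    simp

theorem Cw_short (w : List Int) (b : Nat) (h : w.length ≤ 1) : Cw w b = 0 := by
  unfold Cw
  interval_cases hl : w.length
  · simp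
  · simp [Nat.zero_testBit]

theorem inner_spec : ∀ (k a : Nat) (ans : List Int) (m : Nat), a + k = 17 → ans.length = 17 →
    (((PySem.List.pyRange (a:Int) 17 1).foldl innerStep (ans, (m : Int))).1.length = 17 ∧
     ∀ j : Nat, ((PySem.List.pyRange (a:Int) 17 1).foldl innerStep (ans, (m : Int))).1.getD j 0
        = ans.getD j 0 + (if a ≤ j ∧ j < 17 ∧ Nat.testBit m (j - a) then 1 else 0)) := by
  intro k
  induction k with
  | zero =>
      intro a ans m hk hlen
      have h17 : ((a:Int)) = 17 := by omega
      rw [h17, PySem.List.pyRange_one_eq_nil (le_refl _)]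
      refine ⟨hlen, fun j => ?_⟩
      rw [if_neg (fun h => by omega)]
      simp
  | succ k ih =>
      intro a ans m hk hlen
      have ha : (a:Int) < 17 := by exact_mod_cast (by omega : a < 17)
      rw [PySem.List.pyRange_one_cons ha, List.foldl_cons]
      have hstep : innerStep (ans, (m:Int)) (a:Int)
          = ((if m % 2 = 1 then ans.set a (ans.getD a 0 + 1) else ans), ((m / 2 : Nat) : Int)) := by
        unfold innerStep
        have hb : PySem.Int.band ((m:Int)) 1 = ((m % 2 : Nat) : Int) := by
          rw [show (1:Int) = ((1:Nat):Int) from rfl, PySem.Int.band_natCast, Nat.and_one_is_mod]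
        have hs : ((m:Int) >>> (1:Int)) = ((m / 2 : Nat) : Int) := by
          rw [show ((m:Int) >>> (1:Int)) = ((m >>> 1 : Nat) : Int) from rfl, Nat.shiftRight_one]
        simp only [hb, hs]
        by_cases hm2 : m % 2 = 1
        · rw [if_pos (show (((m % 2 : Nat) : Int) == 1) = true by simp [hm2]), if_pos hm2]
          rw [PySem.List.pySetD_natCast, PySem.List.pyGetD_natCast]
        · rw [if_neg (show ¬ ((((m % 2 : Nat) : Int) == 1) = true) by simp only [beq_iff_eq]; exact_mod_cast hm2), if_neg hm2]
      rw [hstep]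
      have hcast : (a:Int) + 1 = ((a+1 : Nat) : Int) := by push_cast; ring
      rw [hcast]
      set anq := (if m % 2 = 1 then ans.set a (ans.getD a 0 + 1) else ans) with hanq
      have hlq : anq.length = 17 := by
        rw [hanq]; split <;> simp [hlen]
      obtain ⟨ihl, ihg⟩ := ih (a+1) anq (m/2) (by omega) hlq
      refine ⟨ihl, fun j => ?_⟩
      rw [ihg j]
      have hget : anq.getD j 0 = ans.getD j 0 + (if j = a ∧ m % 2 = 1 then 1 else 0) := by
        rw [hanq]
        by_cases hm2 : m % 2 = 1
        · by_cases hj : j = a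
          · subst hj
            rw [if_pos hm2, if_pos ⟨rfl, hm2⟩,
                List.getD_eq_getElem _ _ (by rw [List.length_set, hlen]; omega),
                List.getElem_set_self]
          · rw [if_pos hm2, if_neg (fun h => hj h.1)]
            simp only [List.getD_eq_getElem?_getD, List.getElem?_set]
            rw [if_neg (fun h => hj h.symm)]
            simp
        · rw [if_neg hm2, if_neg (fun h => hm2 h.2)]
          simp
      rw [hget]
      by_cases hj : j = a
      · subst hj
        have hzero : (if j+1 ≤ j ∧ j < 17 ∧ Nat.testBit (m/2) (j-(j+1)) = true then (1:Int) else 0) = 0 := by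
          apply if_neg; rintro ⟨h, -⟩; omega
        rw [hzero]
        by_cases hm2 : m % 2 = 1
        · rw [if_pos ⟨rfl, hm2⟩,
              if_pos ⟨le_refl j, by omega, by
                rw [Nat.sub_self, Nat.testBit_zero]; exact decide_eq_true hm2⟩]
          ring
        · have c1 : ¬(j = j ∧ m % 2 = 1) := fun h => hm2 h.2
          have c2 : ¬(j ≤ j ∧ j < 17 ∧ Nat.testBit m (j-j) = true) := by
            rintro ⟨-, -, hbt⟩
            rw [Nat.sub_self, Nat.testBit_zero] at hbt
            exact hm2 (of_decide_eq_true hbt)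
          rw [if_neg c1, if_neg c2]
          ring
      · rw [if_neg (fun h => hj h.1)]
        have hc : (a ≤ j ∧ j < 17 ∧ Nat.testBit m (j-a)) ↔ (a+1 ≤ j ∧ j < 17 ∧ Nat.testBit (m/2) (j-(a+1))) := by
          constructor
          · rintro ⟨h1, h2, h3⟩
            refine ⟨by omega, h2, ?_⟩
            have he : j - a = (j - (a+1)) + 1 := by omega
            rw [he, Nat.testBit_succ] at h3
            exact h3
          · rintro ⟨h1, h2, h3⟩
            refine ⟨by omega, h2, ?_⟩
            have he : j - a = (j - (a+1)) + 1 := by omega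
            rw [he, Nat.testBit_succ]
            exact h3
        simp only [hc]
        ring

theorem outer_spec (s : List Int) : ∀ (m : Nat), m ≤ s.length →
    (PySem.List.pyRange 1 (m : Int) 1).foldl (outerStep s) (List.replicate 17 0)
      = (List.range 17).map (fun b => Cw (ind (s.take m)) b) := by
  intro m
  induction m with
  | zero =>
      intro _
      rw [PySem.List.pyRange_one_eq_nil (by norm_num)]
      simp only [List.foldl_nil]
      have : ∀ b ∈ List.range 17, Cw (ind (s.take 0)) b = 0 := by
        intro b _
        apply Cw_short
        simp [ind]
      rw [List.map_congr_left this]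
      simp
  | succ m ih =>
      intro hm1
      rcases Nat.eq_zero_or_pos m with h0 | hpos
      · subst h0
        rw [PySem.List.pyRange_one_eq_nil (by norm_num)]
        simp only [List.foldl_nil]
        have : ∀ b ∈ List.range 17, Cw (ind (s.take 1)) b = 0 := by
          intro b _
          apply Cw_short
          simp [ind]
        rw [List.map_congr_left this]
        simp
      · have hcast : ((m+1 : Nat) : Int) = (m : Int) + 1 := by push_cast; ring
        rw [hcast, PySem.List.pyRange_one_succ_right (by exact_mod_cast Nat.one_le_iff_ne_zero.2 (by omega)),
            List.foldl_append, ih (by omega)]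
        have hmlen : m < s.length := by omega
        have htake : s.take (m+1) = s.take m ++ [s[m]] := by
          rw [List.take_add_one]
          congr 1
          rw [List.getElem?_eq_getElem hmlen]
          rfl
        have hind : ind (s.take (m+1)) = ind (s.take m) ++ [if s[m] == 1 then (1:Int) else 0] := by
          unfold ind
          rw [htake, List.map_append]
          simp only [List.map_cons, List.map_nil]
        have hlind : (ind (s.take m)).length = m := by
          simp [ind]; omega
        simp only [List.foldl_cons, List.foldl_nil]
        unfold outerStep
        rw [PySem.List.pyGetD_natCast]
        rw [List.getD_eq_getElem _ _ hmlen]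
        by_cases hx : s[m] = 1
        · rw [if_pos (by simp [hx])]
          have hlen17 : ((List.range 17).map (fun b => Cw (ind (s.take m)) b)).length = 17 := by simp
          obtain ⟨hL, hG⟩ := inner_spec 17 0 ((List.range 17).map (fun b => Cw (ind (s.take m)) b)) m rfl hlen17
          rw [show ((0:Nat):Int) = 0 from rfl] at hL hG
          apply List.ext_getElem (by simp [hL])
          intro j hj1 hj2
          have hj17 : j < 17 := by rw [hL] at hj1; exact hj1
          rw [← List.getD_eq_getElem _ 0 hj1, ← List.getD_eq_getElem _ 0 hj2, hG j]
          rw [PySem.List.getD_map_range _ _ _ _ hj17, PySem.List.getD_map_range _ _ _ _ hj17]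
          rw [hind, Cw_append, hlind]
          simp [hx, hj17]
        · rw [if_neg (by simp [hx])]
          apply List.map_congr_left
          intro b _
          rw [hind, Cw_append, hlind]
          simp [hx]

theorem cnt_odd_eq_spec (s : List Int) : cnt_odd s = (List.range 17).map (fun b => Cw (ind s) b) := by
  have hdef : cnt_odd s = (PySem.List.pyRange 1 ((s.length : Int)) 1).foldl (outerStep s) (List.replicate 17 0) := by
    rw [show PySem.List.pyRange 1 ((s.length : Int)) 1 = PySem.List.pyRange 1 (PySem.List.len s) 1 by rw [PySem.List.len_eq]]
    rfl
  rw [hdef, outer_spec s s.length le_rfl, List.take_length]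

theorem cnt_odd_alt_eq_spec (s : List Int) : cnt_odd_alt s = (List.range 17).map (fun b => Cw (ind s) b) := by
  show pvLevels 17 (ind s) = _
  exact pvLevels_eq 17 (ind s)

-- ===== VERDICT (by name: the statement is the Claim_ definition above) =====
theorem cnt_odd_spec : Claim_equal_cnt_odd := by
  intro s _
  unfold Spec_cnt_odd
  rw [cnt_odd_eq_spec, cnt_odd_alt_eq_spec]
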